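-- pv_equiv track=rewrite | github.com/epilectrik/voynich | legacy/semantic_analysis/encyclopedia_comparison.py | segment_into_entries
-- ===== SOURCE A (Python) =====
-- from collections import Counter, defaultdict
-- from typing import Dict, List, Tuple, Any
--
-- def segment_into_entries(words: List[Dict]) -> List[List[Dict]]:
--     """Segment by folio."""
--     by_folio = defaultdict(list)
--     for w in words:
--         by_folio[w['folio']].append(w)
--
--     entries = []
--     for folio in sorted(by_folio.keys()):
--         entries.append(by_folio[folio])
--
--     return entries
-- ===== SOURCE B (Python) =====
-- def segment_into_entries(words):
--     """Segment by folio."""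
--     folios = sorted({w['folio'] for w in words})
--     return [[w for w in words if w['folio'] == f] for f in folios]
-- ===== Notes on version B (the rewrite author's own statement) =====
-- stated objective: simpler
-- what changed: Instead of building a dict-of-lists index in one pass and emitting its stored groups, B collects the sorted set of folio keys and produces each group by filtering the original list per key (no index maintained).
import Mathlib
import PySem

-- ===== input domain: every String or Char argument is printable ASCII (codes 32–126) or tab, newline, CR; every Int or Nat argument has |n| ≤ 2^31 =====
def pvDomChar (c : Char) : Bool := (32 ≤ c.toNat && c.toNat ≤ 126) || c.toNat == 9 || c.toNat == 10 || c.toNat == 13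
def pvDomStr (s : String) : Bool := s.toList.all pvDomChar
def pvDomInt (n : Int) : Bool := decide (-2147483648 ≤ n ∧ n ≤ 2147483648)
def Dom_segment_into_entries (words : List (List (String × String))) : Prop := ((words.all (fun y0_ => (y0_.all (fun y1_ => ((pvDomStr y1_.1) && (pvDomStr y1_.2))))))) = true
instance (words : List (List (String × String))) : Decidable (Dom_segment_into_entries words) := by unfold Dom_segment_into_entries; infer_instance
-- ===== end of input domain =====

-- B groups without any dict index: it sorts the distinct folio keys once and filters the
-- original list per key; same return value, plainer code (no index maintained).

-- shared helper: w['folio'] for a word dict, exact when the key is present (guaranteed by Pre_)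
def pvFolio (w : List (String × String)) : String := PySem.Dict.getD (PySem.Dict.mk w) "folio" ""

-- ===== PORT A =====
def segment_into_entries (words : List (List (String × String))) : List (List (List (String × String))) :=
  let by_folio := words.foldl (fun d w => d.modify (pvFolio w) [] (fun cur => cur ++ [w])) PySem.Dict.empty
  (PySem.List.sorted by_folio.keys (fun k => k) false).foldl
    (fun entries folio => entries ++ [by_folio.getD folio []]) []

-- ===== PORT B =====
def segment_into_entries_alt (words : List (List (String × String))) : List (List (List (String × String))) :=
  let folios := PySem.List.sorted (PySem.Set.ofList (words.map pvFolio)) (fun k => k) false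
  folios.map (fun f => words.filter (fun w => pvFolio w == f))

-- ===== PRECONDITION & SPEC =====
-- Pre_ excludes words missing the 'folio' key, on which A raises KeyError (so does B).
def Pre_segment_into_entries (words : List (List (String × String))) : Prop :=
  (words.all (fun w => PySem.Dict.contains (PySem.Dict.mk w) "folio")) = true
instance (words : List (List (String × String))) : Decidable (Pre_segment_into_entries words) := by unfold Pre_segment_into_entries; infer_instance
def pvWitness_segment_into_entries : (List (List (String × String))) :=
  [[("folio", "f1"), ("word", "daiin")], [("folio", "f2"), ("word", "chol")], [("folio", "f1"), ("word", "qokedy")]]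
def Spec_segment_into_entries (words : List (List (String × String))) (out : List (List (List (String × String)))) : Prop := out = segment_into_entries_alt words
instance (words : List (List (String × String))) (out : List (List (List (String × String)))) : Decidable (Spec_segment_into_entries words out) := by unfold Spec_segment_into_entries; infer_instance

-- ===== CLAIM (what is proved, stated in full; the proofs are below) =====
def Claim_equal_segment_into_entries : Prop := ∀ (words : List (List (String × String))), Dom_segment_into_entries words → Pre_segment_into_entries words → Spec_segment_into_entries words (segment_into_entries words)

-- ===== LEMMAS AND PROOFS =====

-- A's accumulation loop appending one group per key is the map of lookups over the keys
theorem foldl_append_singleton {α β : Type} (f : α → β) (xs : List α) (acc : List β) :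
    xs.foldl (fun a x => a ++ [f x]) acc = acc ++ xs.map f := by
  induction xs generalizing acc with
  | nil => simp
  | cons x t ih => simp [List.foldl, ih]

-- invariant of A's grouping loop: the group stored at key c is the filter of the processed words
theorem getD_group_loop (l : List (List (String × String)))
    (d : PySem.Dict String (List (List (String × String)))) (c : String) :
    (l.foldl (fun d w => d.modify (pvFolio w) [] (fun cur => cur ++ [w])) d).getD c []
      = d.getD c [] ++ l.filter (fun w => pvFolio w == c) := by
  induction l generalizing d with
  | nil => simp
  | cons w t ih =>
    simp only [List.foldl, List.filter]
    rw [ih]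
    by_cases h : pvFolio w = c
    · subst h; simp [PySem.Dict.getD_modify_self]
    · rw [PySem.Dict.getD_modify]
      have hb : (pvFolio w == c) = false := by simpa using h
      simp [hb, Ne.symm h]

theorem segment_into_entries_spec : Claim_equal_segment_into_entries := by
  intro words _ _
  unfold Spec_segment_into_entries segment_into_entries segment_into_entries_alt
  simp only []
  rw [foldl_append_singleton]
  have hkeys : (words.foldl (fun d w => d.modify (pvFolio w) [] (fun cur => cur ++ [w]))
      PySem.Dict.empty).keys = PySem.Set.ofList (words.map pvFolio) := by
    rw [PySem.Dict.keys_foldl_modify_key]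
    simp [PySem.Set.update_nil_left]
  rw [hkeys]
  simp only [List.nil_append]
  apply List.map_congr_left
  intro f _
  rw [getD_group_loop]
  simp

-- ===== VERDICT (by name: the statement is the Claim_ definition above) =====
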